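-- pv_equiv track=rewrite | github.com/waffle87/leetcode | lex_smallest_beaut_str.py | smallestBeautifulString
-- ===== SOURCE A (Python) =====
-- def smallestBeautifulString(s, k):
--     """
--     :type s: str
--     :type k: int
--     :rtype: str
--     """
--     ans = [ord(c) - ord("a") for c in s]
--     n = len(ans) - 1
--     while n >= 0:
--         ans[n] += 1
--         if ans[n] == k:
--             n -= 1
--         elif ans[n] not in ans[max(n - 2, 0) : n]:
--             for j in range(n + 1, len(ans)):
--                 ans[j] = min({0, 1, 2} - set(ans[max(0, j - 2) : j]))
--             return "".join(chr(ord("a") + i) for i in ans)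
--     return ""
-- ===== SOURCE B (Python) =====
-- def smallestBeautifulString(s, k):
--     a = [ord(c) - ord('a') for c in s]
--     n = len(a)
--
--     def bump(i):
--         # closed-form: first value of a[i]+1, a[i]+2, ... that either hits k
--         # (-> None, position unusable) or differs from both preceding letters
--         p1 = a[i - 1] if i >= 1 else None
--         p2 = a[i - 2] if i >= 2 else None
--         lo = a[i] + 1
--         r = lo + (1 if lo == p1 or lo == p2 else 0)
--         r = r + (1 if r == p1 or r == p2 else 0)
--         return None if lo <= k <= r else r
--
--     pos = None
--     for i in range(n):
--         if bump(i) is not None: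
--             pos = i
--     if pos is None:
--         return ''
--     out = a[:pos] + [bump(pos)]
--     p1 = out[-1]
--     p2 = out[-2] if len(out) >= 2 else None
--     for _ in range(n - pos - 1):
--         if p1 != 0 and p2 != 0:
--             t = 0
--         elif p1 != 1 and p2 != 1:
--             t = 1
--         else:
--             t = 2
--         out.append(t)
--         p1, p2 = t, p1
--     return ''.join(chr(ord('a') + v) for v in out)
-- ===== Notes on version B (the rewrite author's own statement) =====
-- stated objective: alternative
-- what changed: A runs a backward increment-with-carry while-loop mutating one shared list and testing candidates by repeated slice membership; B is staged and loop-free per position: a closed-form arithmetic bump (two conditional +1 steps) computed independently for every position, a forward scan keeping the last viable position, and a suffix fill that tracks the trailing two letters in a pair instead of slicing and set-difference.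
import Mathlib
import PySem

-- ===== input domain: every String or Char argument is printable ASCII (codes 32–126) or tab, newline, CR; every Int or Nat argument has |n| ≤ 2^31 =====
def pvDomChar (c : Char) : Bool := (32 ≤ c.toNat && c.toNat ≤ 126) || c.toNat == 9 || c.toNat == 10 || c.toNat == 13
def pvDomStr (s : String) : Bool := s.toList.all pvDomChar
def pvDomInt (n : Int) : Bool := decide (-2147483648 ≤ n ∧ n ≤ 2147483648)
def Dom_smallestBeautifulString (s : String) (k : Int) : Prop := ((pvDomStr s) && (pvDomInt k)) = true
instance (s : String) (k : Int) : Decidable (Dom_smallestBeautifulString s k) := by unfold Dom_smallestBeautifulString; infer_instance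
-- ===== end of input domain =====

-- B replaces A's backward increment-with-carry loop over one shared mutable list by three
-- loop-free-per-position stages: a closed-form bump for every position, a forward scan for the
-- last viable position, and a fill tracking the trailing two letters (objective: alternative).

-- ===== PORT A =====

-- termination measure fact for A's inner `while`: each continue step lands on a
-- window element, so the count of window elements ≥ the current value strictly drops
theorem pvWindowMeasure (W : List Int) (v : Int) (h : v ∈ W) :
    (W.filter (fun w => decide (v + 1 ≤ w))).length < (W.filter (fun w => decide (v ≤ w))).length := by
  induction W with
  | nil => cases h
  | cons a tl ih =>
    rcases List.mem_cons.mp h with rfl | hm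
    · have hmon : (tl.filter (fun w => decide (v + 1 ≤ w))).length
          ≤ (tl.filter (fun w => decide (v ≤ w))).length := by
        have hsub : tl.filter (fun w => decide (v + 1 ≤ w))
            = (tl.filter (fun w => decide (v ≤ w))).filter (fun w => decide (v + 1 ≤ w)) := by
          rw [List.filter_filter]
          apply List.filter_congr
          intro w _
          by_cases hw : v + 1 ≤ w
          · have hw' : v ≤ w := by omega
            simp [hw, hw']
          · simp [hw]
        rw [hsub]
        exact List.length_filter_le _ _
      have hlt : ¬ (v + 1 ≤ v) := by omega
      simp only [List.filter_cons, hlt, decide_false, le_refl, decide_true, List.length_cons,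
        if_false, if_true, Bool.false_eq_true]
      omega
    · have hih := ih hm
      simp only [List.filter_cons]
      by_cases ha1 : v + 1 ≤ a
      · have ha2 : v ≤ a := by omega
        simp only [ha1, ha2, decide_true, ite_true, List.length_cons]
        omega
      · by_cases ha2 : v ≤ a <;>
          simp only [ha1, ha2, decide_true, decide_false, ite_true, ite_false,
            Bool.false_eq_true, List.length_cons] <;> omega

-- the body of A's `while` at a fixed position, entered with the just-incremented value v:
-- `if ans[n] == k: give up (none)  elif ans[n] not in window: return value  else: increment again`
def pvInnerA (W : List Int) (k : Int) (v : Int) : Option Int :=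
  if v = k then none
  else if v ∈ W then pvInnerA W k (v + 1)
  else some v
termination_by (W.filter (fun w => decide (v ≤ w))).length
decreasing_by exact pvWindowMeasure W v (by assumption)

-- min({0, 1, 2} - set(W))  (the difference is never empty: W is a slice of length ≤ 2)
def pvMinA (W : List Int) : Int :=
  (([0, 1, 2].filter (fun x => decide (x ∉ W))).min?).getD 0

-- `for j in range(n + 1, len(ans)): ans[j] = min({0,1,2} - set(ans[max(0, j - 2):j]))`
def pvFillA (l : List Int) (j : Nat) : List Int :=
  if h : j < l.length then
    pvFillA (l.set j (pvMinA (PySem.List.slice l (some (max 0 ((j : Int) - 2))) (some (j : Int))))) (j + 1)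
  else l
termination_by l.length - j
decreasing_by simp only [List.length_set]; omega

-- A's `while n >= 0` loop; the Nat argument is n + 1 (0 means n has passed -1)
def pvLoopA (k : Int) (ans : List Int) : Nat → String
  | 0 => ""
  | n + 1 =>
    let W := PySem.List.slice ans (some (max ((n : Int) - 2) 0)) (some (n : Int))
    match pvInnerA W k (ans.getD n 0 + 1) with   -- ans[n] += 1 …; index n is always in range
    | none => pvLoopA k (ans.set n k) n          -- gave up here: the stored value has reached k
    | some v =>
        -- "".join(chr(ord('a') + i) for i in ans): codes stay in 32..130, where Char.ofNat = chr
        String.ofList ((pvFillA (ans.set n v) (n + 1)).map (fun i => Char.ofNat (97 + i).toNat))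

def smallestBeautifulString (s : String) (k : Int) : String :=
  let ans := s.toList.map (fun c => (c.toNat : Int) - 97)   -- [ord(c) - ord('a') for c in s]
  pvLoopA k ans ans.length

-- ===== PORT B =====

-- `bump(i)`: closed-form next candidate at position i; p1 = a[i-1], p2 = a[i-2] (None if absent)
def pvBumpB (a : List Int) (k : Int) (i : Nat) : Option Int :=
  let p1 : Option Int := if 1 ≤ i then some (a.getD (i - 1) 0) else none
  let p2 : Option Int := if 2 ≤ i then some (a.getD (i - 2) 0) else none
  let lo := a.getD i 0 + 1
  let r1 := lo + (if some lo = p1 ∨ some lo = p2 then 1 else 0)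
  let r := r1 + (if some r1 = p1 ∨ some r1 = p2 then 1 else 0)
  if lo ≤ k ∧ k ≤ r then none else some r

-- `pos = None; for i in range(n): if bump(i) is not None: pos = i`
def pvPosB (a : List Int) (k : Int) : Option Nat :=
  (List.range a.length).foldl (fun pos i => if (pvBumpB a k i).isSome then some i else pos) none

-- the suffix fill: `for _ in range(n - pos - 1): … out.append(t); p1, p2 = t, p1`
def pvFillB (m : Nat) (out : List Int) (p1 : Int) (p2 : Option Int) : List Int :=
  match m with
  | 0 => out
  | m + 1 =>
    let t : Int := if p1 ≠ 0 ∧ p2 ≠ some 0 then 0 else if p1 ≠ 1 ∧ p2 ≠ some 1 then 1 else 2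
    pvFillB m (out ++ [t]) t (some p1)

-- the success tail of B: `out = a[:pos] + [bump(pos)]; p1 = out[-1]; p2 = out[-2] …; join`
def pvBuildB (a : List Int) (k : Int) (i : Nat) : String :=
  let out := PySem.List.slice a none (some (i : Int)) ++ [(pvBumpB a k i).getD 0]
  let p1 := (PySem.List.pyGet? out (-1)).getD 0
  let p2 : Option Int := if 2 ≤ out.length then some ((PySem.List.pyGet? out (-2)).getD 0) else none
  String.ofList ((pvFillB (a.length - (i + 1)) out p1 p2).map (fun v => Char.ofNat (97 + v).toNat))

def smallestBeautifulString_alt (s : String) (k : Int) : String :=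
  let a := s.toList.map (fun c => (c.toNat : Int) - 97)
  match pvPosB a k with
  | none => ""
  | some i => pvBuildB a k i

-- ===== PRECONDITION & SPEC =====
def Spec_smallestBeautifulString (s : String) (k : Int) (out : String) : Prop := out = smallestBeautifulString_alt s k
instance (s : String) (k : Int) (out : String) : Decidable (Spec_smallestBeautifulString s k out) := by unfold Spec_smallestBeautifulString; infer_instance

-- ===== CLAIM (what is proved, stated in full; the proofs are below) =====
def Claim_equal_smallestBeautifulString : Prop := ∀ (s : String) (k : Int), Dom_smallestBeautifulString s k → Spec_smallestBeautifulString s k (smallestBeautifulString s k)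

-- ===== LEMMAS AND PROOFS =====

-- proof-side recursion computing pvPosB: last i < n with a viable bump
def pvLastOk (a : List Int) (k : Int) : Nat → Option Nat
  | 0 => none
  | n + 1 => if (pvBumpB a k n).isSome then some n else pvLastOk a k n

theorem pvPos_lastOk_aux (a : List Int) (k : Int) : ∀ (n : Nat) (acc : Option Nat),
    (List.range n).foldl (fun pos i => if (pvBumpB a k i).isSome then some i else pos) acc
      = (match pvLastOk a k n with | some i => some i | none => acc) := by
  intro n
  induction n with
  | zero => intro acc; rfl
  | succ n ih =>
    intro acc
    rw [List.range_succ, List.foldl_append, ih acc]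
    simp only [List.foldl_cons, List.foldl_nil, pvLastOk]
    by_cases hb : (pvBumpB a k n).isSome <;> simp [hb]

theorem pvPos_eq_lastOk (a : List Int) (k : Int) : pvPosB a k = pvLastOk a k a.length := by
  rw [pvPosB, pvPos_lastOk_aux]
  cases pvLastOk a k a.length <;> rfl

-- the slice window ans[max(0, i-2):i] in explicit form (i ≤ len)
theorem pvWindow (l : List Int) (i : Nat) (hi : i ≤ l.length) :
    PySem.List.slice l (some (max 0 ((i : Int) - 2))) (some (i : Int))
      = if 2 ≤ i then [l.getD (i - 2) 0, l.getD (i - 1) 0]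
        else if 1 ≤ i then [l.getD (i - 1) 0] else [] := by
  by_cases h2 : 2 ≤ i
  · have hm : max 0 ((i : Int) - 2) = ((i - 2 : Nat) : Int) := by omega
    rw [hm, PySem.List.slice_natCast]
    have hd : i - (i - 2) = 2 := by omega
    have h1 : i - 2 + 1 = i - 1 := by omega
    rw [hd, List.drop_eq_getElem_cons (by omega : i - 2 < l.length),
      List.drop_eq_getElem_cons (by omega : i - 2 + 1 < l.length), if_pos h2]
    simp only [List.take_succ_cons, List.take_zero, h1]
    rw [List.getD_eq_getElem l 0 (by omega : i - 2 < l.length),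
      List.getD_eq_getElem l 0 (by omega : i - 1 < l.length)]
  · rw [if_neg h2]
    by_cases h1 : 1 ≤ i
    · have hi1 : i = 1 := by omega
      subst hi1
      simp only [Nat.cast_one]
      have hm : max 0 ((1 : Int) - 2) = 0 := by omega
      rw [hm, if_pos (le_refl 1)]
      rw [PySem.List.slice_toNat l (by omega) (by omega)]
      obtain ⟨x, t, rfl⟩ : ∃ x t, l = x :: t := by
        cases l with
        | nil => simp at hi
        | cons x t => exact ⟨x, t, rfl⟩
      simp
    · have hi0 : i = 0 := by omega
      subst hi0
      simp only [Nat.cast_zero]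
      have hm : max 0 ((0 : Int) - 2) = 0 := by omega
      rw [hm, if_neg h1]
      rw [PySem.List.slice_toNat l (by omega) (by omega)]
      simp

-- A's inner scan, in closed form, given a membership characterisation of the window
theorem pvInnerA_closed (W : List Int) (p1 p2 : Option Int) (k lo : Int)
    (H : ∀ v : Int, v ∈ W ↔ (some v = p1 ∨ some v = p2)) :
    pvInnerA W k lo =
      (let r1 := lo + (if some lo = p1 ∨ some lo = p2 then 1 else 0)
       let r := r1 + (if some r1 = p1 ∨ some r1 = p2 then 1 else 0)
       if lo ≤ k ∧ k ≤ r then none else some r) := by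
  by_cases h1 : some lo = p1 ∨ some lo = p2
  · have hmem : lo ∈ W := (H lo).mpr h1
    by_cases h2 : some (lo + 1) = p1 ∨ some (lo + 1) = p2
    · have hmem2 : lo + 1 ∈ W := (H _).mpr h2
      have hp : (p1 = some lo ∧ p2 = some (lo + 1)) ∨ (p1 = some (lo + 1) ∧ p2 = some lo) := by
        rcases h1 with e1 | e1 <;> rcases h2 with e2 | e2
        · rw [← e1] at e2; simp only [Option.some.injEq] at e2; omega
        · exact Or.inl ⟨e1.symm, e2.symm⟩
        · exact Or.inr ⟨e2.symm, e1.symm⟩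
        · rw [← e1] at e2; simp only [Option.some.injEq] at e2; omega
      have hnot3 : ¬ (some (lo + 1 + 1) = p1 ∨ some (lo + 1 + 1) = p2) := by
        rcases hp with ⟨hq1, hq2⟩ | ⟨hq1, hq2⟩ <;> rw [hq1, hq2] <;>
          simp only [Option.some.injEq] <;> omega
      have hmem3 : lo + 1 + 1 ∉ W := fun hc => hnot3 ((H _).mp hc)
      simp only [h1, h2, if_true]
      by_cases hk1 : lo = k
      · rw [pvInnerA, if_pos hk1, if_pos (by omega : lo ≤ k ∧ k ≤ lo + 1 + 1)]
      · rw [pvInnerA, if_neg hk1, if_pos hmem]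
        by_cases hk2 : lo + 1 = k
        · rw [pvInnerA, if_pos hk2, if_pos (by omega : lo ≤ k ∧ k ≤ lo + 1 + 1)]
        · rw [pvInnerA, if_neg hk2, if_pos hmem2]
          by_cases hk3 : lo + 1 + 1 = k
          · rw [pvInnerA, if_pos hk3, if_pos (by omega : lo ≤ k ∧ k ≤ lo + 1 + 1)]
          · rw [pvInnerA, if_neg hk3, if_neg hmem3,
              if_neg (by omega : ¬ (lo ≤ k ∧ k ≤ lo + 1 + 1))]
    · have hmem2 : lo + 1 ∉ W := fun hc => h2 ((H _).mp hc)
      simp only [h1, h2, if_true, if_false, add_zero]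
      by_cases hk1 : lo = k
      · rw [pvInnerA, if_pos hk1, if_pos (by omega : lo ≤ k ∧ k ≤ lo + 1)]
      · rw [pvInnerA, if_neg hk1, if_pos hmem]
        by_cases hk2 : lo + 1 = k
        · rw [pvInnerA, if_pos hk2, if_pos (by omega : lo ≤ k ∧ k ≤ lo + 1)]
        · rw [pvInnerA, if_neg hk2, if_neg hmem2,
            if_neg (by omega : ¬ (lo ≤ k ∧ k ≤ lo + 1))]
  · have hmem : lo ∉ W := fun hc => h1 ((H _).mp hc)
    simp only [h1, if_false, add_zero]
    by_cases hk1 : lo = k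
    · rw [pvInnerA, if_pos hk1, if_pos (by omega : lo ≤ k ∧ k ≤ lo)]
    · rw [pvInnerA, if_neg hk1, if_neg hmem, if_neg (by omega : ¬ (lo ≤ k ∧ k ≤ lo))]

-- A's inner scan at position i computes exactly B's closed-form bump
theorem pvInner_eq_bump (a : List Int) (k : Int) (i : Nat) (hi : i < a.length) :
    pvInnerA (PySem.List.slice a (some (max ((i : Int) - 2) 0)) (some (i : Int))) k (a.getD i 0 + 1)
      = pvBumpB a k i := by
  rw [max_comm ((i : Int) - 2) 0, pvWindow a i (le_of_lt hi)]
  by_cases h2 : 2 ≤ i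
  · rw [if_pos h2,
      pvInnerA_closed _ (some (a.getD (i - 1) 0)) (some (a.getD (i - 2) 0)) k _
        (by intro v
            simp only [List.mem_cons, List.not_mem_nil, or_false, Option.some.injEq]
            tauto)]
    simp only [pvBumpB, if_pos h2, if_pos (show 1 ≤ i by omega)]
  · by_cases h1 : 1 ≤ i
    · rw [if_neg h2, if_pos h1,
        pvInnerA_closed _ (some (a.getD (i - 1) 0)) none k _
          (by intro v
              simp only [List.mem_cons, List.not_mem_nil, or_false, Option.some.injEq]
              tauto)]
      simp only [pvBumpB, if_neg h2, if_pos h1]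
    · rw [if_neg h2, if_neg h1,
        pvInnerA_closed _ none none k _ (by intro v; simp)]
      simp only [pvBumpB, if_neg h2, if_neg h1]

-- A's min({0,1,2} - set(W)) in closed form, given a membership characterisation of W
theorem pvMinA_closed (W : List Int) (q1 q2 : Option Int)
    (H : ∀ v : Int, v ∈ W ↔ (some v = q1 ∨ some v = q2)) :
    pvMinA W = if q1 ≠ some 0 ∧ q2 ≠ some 0 then 0 else if q1 ≠ some 1 ∧ q2 ≠ some 1 then 1 else 2 := by
  have c0 : (q1 ≠ some 0 ∧ q2 ≠ some 0) ↔ ((0 : Int) ∉ W) := by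
    rw [H 0, not_or]
    constructor
    · rintro ⟨a1, a2⟩; exact ⟨fun h => a1 h.symm, fun h => a2 h.symm⟩
    · rintro ⟨a1, a2⟩; exact ⟨fun h => a1 h.symm, fun h => a2 h.symm⟩
  have c1 : (q1 ≠ some 1 ∧ q2 ≠ some 1) ↔ ((1 : Int) ∉ W) := by
    rw [H 1, not_or]
    constructor
    · rintro ⟨a1, a2⟩; exact ⟨fun h => a1 h.symm, fun h => a2 h.symm⟩
    · rintro ⟨a1, a2⟩; exact ⟨fun h => a1 h.symm, fun h => a2 h.symm⟩
  by_cases m0 : (0 : Int) ∈ W <;> by_cases m1 : (1 : Int) ∈ W <;> by_cases m2 : (2 : Int) ∈ W <;>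
    try simp [pvMinA, c0, c1, m0, m1, m2, List.filter, List.min?]
  -- the remaining case 0,1,2 ∈ W is impossible: three values, two slots
  exfalso
  rcases (H 0).mp m0 with e0 | e0 <;> rcases (H 1).mp m1 with e1 | e1 <;>
      rcases (H 2).mp m2 with e2 | e2 <;>
    first
      | (rw [← e0] at e1; exact absurd (Option.some.inj e1) (by omega))
      | (rw [← e0] at e2; exact absurd (Option.some.inj e2) (by omega))
      | (rw [← e1] at e2; exact absurd (Option.some.inj e2) (by omega))

-- a [a:j] slice only reads the first j elements
theorem pvSlice_take (l : List Int) (a : Int) (j : Nat) (ha : 0 ≤ a) :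
    PySem.List.slice l (some a) (some (j : Nat)) = PySem.List.slice (l.take j) (some a) (some (j : Int)) := by
  rw [PySem.List.slice_toNat l ha (Int.natCast_nonneg j),
    PySem.List.slice_toNat (List.take j l) ha (Int.natCast_nonneg j)]
  simp [List.drop_take, List.take_take]

-- unfolding equations for pvFillB, with the `let` inlined
theorem pvFillB_zero (out : List Int) (p1 : Int) (p2 : Option Int) : pvFillB 0 out p1 p2 = out := rfl

theorem pvFillB_succ (m : Nat) (out : List Int) (p1 : Int) (p2 : Option Int) :
    pvFillB (m + 1) out p1 p2
      = pvFillB m (out ++ [if p1 ≠ 0 ∧ p2 ≠ some 0 then (0 : Int) else if p1 ≠ 1 ∧ p2 ≠ some 1 then 1 else 2])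
          (if p1 ≠ 0 ∧ p2 ≠ some 0 then (0 : Int) else if p1 ≠ 1 ∧ p2 ≠ some 1 then 1 else 2) (some p1) := rfl

-- the two spellings of the fill letter coincide
theorem pvT_eq (x : Int) (y : Option Int) :
    (if (some x : Option Int) ≠ some 0 ∧ y ≠ some 0 then (0 : Int)
      else if (some x : Option Int) ≠ some 1 ∧ y ≠ some 1 then 1 else 2)
      = if x ≠ 0 ∧ y ≠ some 0 then (0 : Int) else if x ≠ 1 ∧ y ≠ some 1 then 1 else 2 := by
  simp only [ne_eq, Option.some.injEq]

-- lists agreeing on their first m elements agree at every index below m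
theorem pvGetD_of_take_eq (l a : List Int) (m i : Nat) (h : l.take m = a.take m) (hi : i < m) :
    l.getD i 0 = a.getD i 0 := by
  have h1 : (l.take m)[i]? = (a.take m)[i]? := by rw [h]
  have h2 : l[i]? = a[i]? := by simpa [List.getElem?_take, hi] using h1
  simp [List.getD_eq_getElem?_getD, h2]

-- pvBuildB with the bump known, components computed
theorem pvBuildB_some (a : List Int) (k : Int) (i : Nat) (v : Int)
    (hb : pvBumpB a k i = some v) (hi : i < a.length) :
    pvBuildB a k i = String.ofList ((pvFillB (a.length - (i + 1)) (a.take i ++ [v]) v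
      (if 1 ≤ i then some (a.getD (i - 1) 0) else none)).map (fun c => Char.ofNat (97 + c).toNat)) := by
  simp only [pvBuildB, hb, Option.getD_some]
  rw [PySem.List.slice_to_natCast]
  have hlen : (a.take i ++ [v]).length = i + 1 := by
    simp [List.length_take]
    omega
  rw [PySem.List.pyGet?_neg_one_append_singleton, hlen]
  by_cases hi1 : 1 ≤ i
  · rw [if_pos (show 2 ≤ i + 1 by omega), if_pos hi1,
      PySem.List.pyGet?_neg_ofNat _ 2 (by omega) (by rw [hlen]; omega), hlen]
    have e : (a.take i ++ [v])[i + 1 - 2]? = a[i - 1]? := by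
      rw [List.getElem?_append_left (by simp [List.length_take]; omega)]
      have h2 : i + 1 - 2 = i - 1 := by omega
      simp [h2, show i - 1 < i by omega]
    rw [e]
    simp [List.getD_eq_getElem?_getD]
  · rw [if_neg (show ¬ 2 ≤ i + 1 by omega), if_neg hi1]
    simp

-- the fill loops agree: A overwrites in place with slice windows, B appends tracking the last two
theorem pvFill_eq (m : Nat) : ∀ (l : List Int) (j : Nat), 1 ≤ j → j ≤ l.length → l.length - j = m →
    pvFillA l j = pvFillB m (l.take j) (l.getD (j - 1) 0)
      (if 2 ≤ j then some (l.getD (j - 2) 0) else none) := by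
  induction m with
  | zero =>
    intro l j h1 hj hm
    rw [pvFillA, dif_neg (by omega : ¬ j < l.length), pvFillB_zero,
      List.take_of_length_le (by omega : l.length ≤ j)]
  | succ m ih =>
    intro l j h1 hj hm
    have hjl : j < l.length := by omega
    have hsub : j + 1 - 2 = j - 1 := by omega
    conv_lhs => rw [pvFillA]
    rw [dif_pos hjl, pvWindow l j (le_of_lt hjl)]
    by_cases h2 : 2 ≤ j
    · rw [if_pos h2, if_pos h2,
        pvMinA_closed _ (some (l.getD (j - 1) 0)) (some (l.getD (j - 2) 0))
          (by intro v
              simp only [List.mem_cons, List.not_mem_nil, or_false, Option.some.injEq]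
              tauto),
        pvT_eq, pvFillB_succ]
      refine (ih _ (j + 1) (by omega) (by simp only [List.length_set]; omega)
        (by simp only [List.length_set]; omega)).trans ?_
      set T : Int := if l.getD (j - 1) 0 ≠ 0 ∧ some (l.getD (j - 2) 0) ≠ some 0 then 0
        else if l.getD (j - 1) 0 ≠ 1 ∧ some (l.getD (j - 2) 0) ≠ some 1 then 1 else 2 with hT
      have e1 : (l.set j T).take (j + 1) = l.take j ++ [T] := by
        rw [List.take_add_one, List.take_set_of_le (le_refl j), List.getElem?_set_self hjl]
        rfl
      have e2 : (l.set j T).getD j 0 = T := by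
        simp [List.getD_eq_getElem?_getD, List.getElem?_set_self hjl]
      have e3 : (l.set j T).getD (j - 1) 0 = l.getD (j - 1) 0 := by
        simp [List.getD_eq_getElem?_getD, show ¬ j = j - 1 by omega]
      simp only [Nat.add_sub_cancel, hsub]
      rw [e1, e2, e3, if_pos (show 2 ≤ j + 1 by omega)]
    · rw [if_neg h2, if_pos h1, if_neg h2,
        pvMinA_closed _ (some (l.getD (j - 1) 0)) none
          (by intro v
              simp only [List.mem_cons, List.not_mem_nil, or_false, Option.some.injEq]
              tauto),
        pvT_eq, pvFillB_succ]
      refine (ih _ (j + 1) (by omega) (by simp only [List.length_set]; omega)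
        (by simp only [List.length_set]; omega)).trans ?_
      set T : Int := if l.getD (j - 1) 0 ≠ 0 ∧ (none : Option Int) ≠ some 0 then 0
        else if l.getD (j - 1) 0 ≠ 1 ∧ (none : Option Int) ≠ some 1 then 1 else 2 with hT
      have e1 : (l.set j T).take (j + 1) = l.take j ++ [T] := by
        rw [List.take_add_one, List.take_set_of_le (le_refl j), List.getElem?_set_self hjl]
        rfl
      have e2 : (l.set j T).getD j 0 = T := by
        simp [List.getD_eq_getElem?_getD, List.getElem?_set_self hjl]
      have e3 : (l.set j T).getD (j - 1) 0 = l.getD (j - 1) 0 := by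
        simp [List.getD_eq_getElem?_getD, show ¬ j = j - 1 by omega]
      simp only [Nat.add_sub_cancel, hsub]
      rw [e1, e2, e3, if_pos (show 2 ≤ j + 1 by omega)]

-- main loops agree: A's backward search finds the last viable position of B's forward scan
theorem pvLoop_eq (n : Nat) : ∀ (l a : List Int) (k : Int), l.length = a.length →
    l.take n = a.take n → n ≤ a.length →
    pvLoopA k l n = (match pvLastOk a k n with | none => "" | some i => pvBuildB a k i) := by
  induction n with
  | zero => intro l a k _ _ _; rfl
  | succ n ih =>
    intro l a k hlen htake hle
    have hn : n < a.length := by omega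
    have htn : l.take n = a.take n := by
      have h := congrArg (List.take n) htake
      simpa [List.take_take] using h
    have hel : l.getD n 0 = a.getD n 0 := pvGetD_of_take_eq l a (n + 1) n htake (Nat.lt_succ_self n)
    have hW : PySem.List.slice l (some (max ((n : Int) - 2) 0)) (some (n : Int))
        = PySem.List.slice a (some (max ((n : Int) - 2) 0)) (some (n : Int)) := by
      rw [max_comm ((n : Int) - 2) 0]
      rw [pvSlice_take l _ n (le_max_left 0 _), pvSlice_take a _ n (le_max_left 0 _), htn]
    simp only [pvLoopA]
    rw [hW, hel, pvInner_eq_bump a k n (by omega : n < a.length)]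
    cases hb : pvBumpB a k n with
    | none =>
      rw [show pvLastOk a k (n + 1) = pvLastOk a k n from by simp [pvLastOk, hb]]
      exact ih (l.set n k) a k (by simpa using hlen)
        (by rw [List.take_set_of_le (le_refl n)]; exact htn) (by omega)
    | some v =>
      rw [show pvLastOk a k (n + 1) = some n from by simp [pvLastOk, hb]]
      show String.ofList ((pvFillA (l.set n v) (n + 1)).map (fun i => Char.ofNat (97 + i).toNat))
        = pvBuildB a k n
      rw [pvBuildB_some a k n v hb (by omega)]
      rw [pvFill_eq (l.length - (n + 1)) (l.set n v) (n + 1) (by omega)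
        (by simp only [List.length_set]; omega) (by simp only [List.length_set])]
      have e1 : (l.set n v).take (n + 1) = a.take n ++ [v] := by
        rw [List.take_add_one, List.take_set_of_le (le_refl n), List.getElem?_set_self (by omega), htn]
        rfl
      have e2 : (l.set n v).getD n 0 = v := by
        simp [List.getD_eq_getElem?_getD, List.getElem?_set_self (show n < l.length by omega)]
      have e3 : (if 2 ≤ n + 1 then some ((l.set n v).getD (n + 1 - 2) 0) else none)
          = (if 1 ≤ n then some (a.getD (n - 1) 0) else none) := by
        by_cases h1 : 1 ≤ n
        · rw [if_pos (show 2 ≤ n + 1 by omega), if_pos h1]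
          have h2 : n + 1 - 2 = n - 1 := by omega
          have e4 : (l.set n v).getD (n - 1) 0 = l.getD (n - 1) 0 := by
            simp [List.getD_eq_getElem?_getD, show ¬ n = n - 1 by omega]
          rw [h2, e4, pvGetD_of_take_eq l a n (n - 1) htn (by omega)]
        · rw [if_neg (show ¬ 2 ≤ n + 1 by omega), if_neg h1]
      rw [e1, Nat.add_sub_cancel, e2, e3, hlen]

-- ===== VERDICT (by name: the statement is the Claim_ definition above) =====
theorem smallestBeautifulString_spec : Claim_equal_smallestBeautifulString := by
  intro s k _
  unfold Spec_smallestBeautifulString smallestBeautifulString smallestBeautifulString_alt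
  show pvLoopA k (s.toList.map (fun c => (c.toNat : Int) - 97)) (s.toList.map (fun c => (c.toNat : Int) - 97)).length
      = match pvPosB (s.toList.map (fun c => (c.toNat : Int) - 97)) k with
        | none => "" | some i => pvBuildB (s.toList.map (fun c => (c.toNat : Int) - 97)) k i
  rw [pvPos_eq_lastOk, pvLoop_eq _ _ _ _ rfl rfl (le_refl _)]
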